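-- pv_equiv track=rewrite | github.com/khuramgill/Ai-Labs | Lab 3/2022-Cs-48.py | unbalanced_brackets_stack
-- ===== SOURCE A (Python) =====
-- def unbalanced_brackets_stack(sequence):
--     stack = []
--     for char in sequence:
--         if char == '(':
--             stack.append(char)
--         elif char == ')':
--             if len(stack) > 0 and stack[-1] == '(':
--                 stack.pop()
--             else:
--                 stack.append(char)
--     return '(' * stack.count(')') + sequence + stack.count('(') * ')'
-- ===== SOURCE B (Python) =====
-- def unbalanced_brackets_stack(sequence):
--     deltas = [1 if c == '(' else (-1 if c == ')' else 0) for c in sequence]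
--     balance = 0
--     lowest = 0
--     for d in deltas:
--         balance += d
--         lowest = min(lowest, balance)
--     need_open = -lowest
--     need_close = balance + need_open
--     return '(' * need_open + sequence + ')' * need_close
-- ===== Notes on version B (the rewrite author's own statement) =====
-- stated objective: alternative
-- what changed: Replaces the bracket-matching stack by an arithmetic characterization: brackets become plus/minus-one deltas, and the padding counts are read off the final balance and the minimum prefix balance (prefix padding equals minus the minimum; suffix padding equals balance minus the minimum), with no matching or popping logic at all.
import Mathlib
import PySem

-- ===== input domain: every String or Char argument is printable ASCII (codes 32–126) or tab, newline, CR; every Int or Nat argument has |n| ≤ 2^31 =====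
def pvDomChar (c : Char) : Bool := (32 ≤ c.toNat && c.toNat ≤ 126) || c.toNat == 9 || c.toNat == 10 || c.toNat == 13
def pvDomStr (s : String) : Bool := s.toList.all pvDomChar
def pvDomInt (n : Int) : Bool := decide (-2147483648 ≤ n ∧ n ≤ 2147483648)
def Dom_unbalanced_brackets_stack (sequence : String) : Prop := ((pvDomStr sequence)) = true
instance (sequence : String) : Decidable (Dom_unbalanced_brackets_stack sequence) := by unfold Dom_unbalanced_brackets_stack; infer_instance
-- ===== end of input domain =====

-- B replaces A's bracket-matching stack by arithmetic on ±1 deltas: the padding counts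
-- are the minimum prefix balance and the final balance (objective: alternative).

-- ===== PORT A =====
-- one loop iteration of A: push '(' ; on ')' pop a matching '(' from the top, else push ')'
def pvAStep (stack : List Char) (char : Char) : List Char :=
  if char = '(' then stack ++ ['(']
  else if char = ')' then
    if stack.length > 0 ∧ PySem.List.pyGet? stack (-1) = some '(' then stack.dropLast
    else stack ++ [')']
  else stack

def unbalanced_brackets_stack (sequence : String) : String :=
  let stack := sequence.toList.foldl pvAStep []
  String.ofList (List.replicate (PySem.List.count stack ')') '(') ++ sequence
    ++ String.ofList (List.replicate (PySem.List.count stack '(') ')')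

-- ===== PORT B =====
-- the delta of one character
def pvDelta (c : Char) : Int := if c = '(' then 1 else if c = ')' then -1 else 0

-- one loop iteration of B over (balance, lowest)
def pvBStep (s : Int × Int) (d : Int) : Int × Int := (s.1 + d, min s.2 (s.1 + d))

def unbalanced_brackets_stack_alt (sequence : String) : String :=
  let deltas := sequence.toList.map pvDelta
  let s := deltas.foldl pvBStep (0, 0)
  let need_open : Int := -s.2
  let need_close : Int := s.1 + need_open
  String.ofList (List.replicate need_open.toNat '(') ++ sequence
    ++ String.ofList (List.replicate need_close.toNat ')')

-- ===== PRECONDITION & SPEC =====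
def Spec_unbalanced_brackets_stack (sequence : String) (out : String) : Prop := out = unbalanced_brackets_stack_alt sequence
instance (sequence : String) (out : String) : Decidable (Spec_unbalanced_brackets_stack sequence out) := by unfold Spec_unbalanced_brackets_stack; infer_instance

-- ===== CLAIM (what is proved, stated in full; the proofs are below) =====
def Claim_equal_unbalanced_brackets_stack : Prop := ∀ (sequence : String), Dom_unbalanced_brackets_stack sequence → Spec_unbalanced_brackets_stack sequence (unbalanced_brackets_stack sequence)

-- ===== LEMMAS AND PROOFS =====

-- proof-only counter pair: (unmatched '(' so far, unmatched ')' so far)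
def pvCStep (s : Nat × Nat) (char : Char) : Nat × Nat :=
  if char = '(' then (s.1 + 1, s.2)
  else if char = ')' then
    if s.1 > 0 then (s.1 - 1, s.2) else (s.1, s.2 + 1)
  else s

-- invariant: A's stack is always a run of ')' followed by a run of '(' whose lengths are the counters
theorem pv_stack_inv (cs : List Char) : ∀ (o c : Nat),
    cs.foldl pvAStep (List.replicate c ')' ++ List.replicate o '(')
      = List.replicate (cs.foldl pvCStep (o, c)).2 ')'
        ++ List.replicate (cs.foldl pvCStep (o, c)).1 '(' := by
  induction cs with
  | nil => intro o c; rfl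
  | cons ch cs ih =>
    intro o c
    simp only [List.foldl_cons]
    by_cases h1 : ch = '('
    · have : pvAStep (List.replicate c ')' ++ List.replicate o '(') ch
          = List.replicate c ')' ++ List.replicate (o + 1) '(' := by
        simp [pvAStep, h1, List.replicate_succ']
      rw [this, ih]
      simp [pvCStep, h1]
    · by_cases h2 : ch = ')'
      · subst h2
        cases o with
        | zero =>
          have hstep : pvAStep (List.replicate c ')' ++ List.replicate 0 '(') ')'
              = List.replicate (c + 1) ')' ++ List.replicate 0 '(' := by
            have hlast : ¬ (0 < (List.replicate c ')').length ∧
                PySem.List.pyGet? (List.replicate c ')') (-1) = some '(') := by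
              rintro ⟨hc, hl⟩
              rw [PySem.List.pyGet?_neg_one] at hl
              cases c with
              | zero => simp at hc
              | succ n => rw [List.getLast?_replicate] at hl; simp at hl
            simp only [List.replicate_zero, List.append_nil]
            unfold pvAStep
            rw [if_neg (by decide), if_pos rfl, if_neg (by simpa using hlast),
              ← List.replicate_succ']
          rw [hstep, ih]
          simp [pvCStep]
        | succ n =>
          have hstep : pvAStep (List.replicate c ')' ++ List.replicate (n + 1) '(') ')'
              = List.replicate c ')' ++ List.replicate n '(' := by
            have hsh : List.replicate c ')' ++ List.replicate (n + 1) '('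
                = (List.replicate c ')' ++ List.replicate n '(') ++ ['('] := by
              rw [List.replicate_succ' (n := n), List.append_assoc]
            unfold pvAStep
            rw [if_neg (by decide), if_pos rfl, hsh,
              if_pos ⟨by simp, PySem.List.pyGet?_neg_one_append_singleton _ _⟩,
              List.dropLast_concat]
          rw [hstep, ih]
          simp [pvCStep]
      · have hstep : pvAStep (List.replicate c ')' ++ List.replicate o '(') ch
            = List.replicate c ')' ++ List.replicate o '(' := by
          simp [pvAStep, h1, h2]
        rw [hstep, ih]
        simp [pvCStep, h1, h2]

-- B's (balance, lowest) state determines and is determined by the counter pair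
theorem pv_fold_rel (cs : List Char) : ∀ (o c : Nat),
    cs.foldl (fun s ch => pvBStep s (pvDelta ch)) ((o : Int) - c, -(c : Int))
      = (((cs.foldl pvCStep (o, c)).1 : Int) - ((cs.foldl pvCStep (o, c)).2 : Int),
         -((cs.foldl pvCStep (o, c)).2 : Int)) := by
  induction cs with
  | nil => intro o c; rfl
  | cons ch cs ih =>
    intro o c
    simp only [List.foldl_cons]
    by_cases h1 : ch = '('
    · have hB : pvBStep ((o : Int) - c, -(c : Int)) (pvDelta ch)
          = ((o + 1 : Nat) - (c : Int), -(c : Int)) := by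
        simp only [pvBStep, pvDelta, h1, Prod.ext_iff]
        norm_num
        all_goals omega
      rw [hB, ih]
      simp [pvCStep, h1]
    · by_cases h2 : ch = ')'
      · subst h2
        cases o with
        | zero =>
          have hB : pvBStep ((0 : Nat) - (c : Int), -(c : Int)) (pvDelta ')')
              = ((0 : Nat) - ((c + 1 : Nat) : Int), -((c + 1 : Nat) : Int)) := by
            have hd : pvDelta ')' = -1 := rfl
            rw [hd]
            simp only [pvBStep, Prod.mk.injEq]
            refine ⟨by push_cast; ring, ?_⟩
            rw [min_eq_right (by push_cast; omega)]
            push_cast; ring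
          rw [hB, ih]
          simp [pvCStep]
        | succ n =>
          have hB : pvBStep (((n + 1 : Nat) : Int) - c, -(c : Int)) (pvDelta ')')
              = ((n : Nat) - (c : Int), -(c : Int)) := by
            have hd : pvDelta ')' = -1 := rfl
            rw [hd]
            simp only [pvBStep, Prod.mk.injEq]
            refine ⟨by push_cast; ring, ?_⟩
            rw [min_eq_left (by push_cast; omega)]
          rw [hB, ih]
          simp [pvCStep]
      · have hB : pvBStep ((o : Int) - c, -(c : Int)) (pvDelta ch)
            = ((o : Int) - c, -(c : Int)) := by
          simp only [pvBStep, pvDelta, h1, h2, Prod.ext_iff]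
          norm_num
        rw [hB, ih]
        simp [pvCStep, h1, h2]

theorem pv_count_replicate_pair (o c : Nat) :
    PySem.List.count (List.replicate c ')' ++ List.replicate o '(') ')' = c ∧
    PySem.List.count (List.replicate c ')' ++ List.replicate o '(') '(' = o := by
  constructor <;> simp [PySem.List.count, List.count_replicate]

-- ===== VERDICT (by name: the statement is the Claim_ definition above) =====
theorem unbalanced_brackets_stack_spec : Claim_equal_unbalanced_brackets_stack := by
  intro sequence _
  unfold Spec_unbalanced_brackets_stack unbalanced_brackets_stack unbalanced_brackets_stack_alt
  have hA := pv_stack_inv sequence.toList 0 0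
  simp only [List.replicate_zero, List.append_nil] at hA
  have hB := pv_fold_rel sequence.toList 0 0
  norm_num at hB
  obtain ⟨h1, h2⟩ := pv_count_replicate_pair
    (sequence.toList.foldl pvCStep (0, 0)).1 (sequence.toList.foldl pvCStep (0, 0)).2
  simp only [List.foldl_map, hA, hB, h1, h2]
  have e1 : (- -((sequence.toList.foldl pvCStep (0, 0)).2 : Int)).toNat
      = (sequence.toList.foldl pvCStep (0, 0)).2 := by omega
  have e2 : (((sequence.toList.foldl pvCStep (0, 0)).1 : Int)
        - ((sequence.toList.foldl pvCStep (0, 0)).2 : Int)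
        + - -((sequence.toList.foldl pvCStep (0, 0)).2 : Int)).toNat
      = (sequence.toList.foldl pvCStep (0, 0)).1 := by omega
  rw [e1, e2]
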